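-- pv_equiv track=rewrite | github.com/wotzlaff/ssp-arcflow | ssplib/reflect.py | create_variable_start
-- ===== SOURCE A (Python) =====
-- import collections
--
-- def create_variable_start(inst, is_active, patterns):
--     threshold, lvec, bvec = inst
--     vals = collections.Counter()
--     for pattern in patterns:
--         start = 0
--         for item, count in pattern.items():
--             for _ in range(count):
--                 end = start + 2 * lvec[item]
--                 if end <= threshold:
--                     vals[(start, end, item, 's')] += 1
--                     start = end
--                     if start == threshold:
--                         start = 0
--                 else:
--                     end = 2 * threshold - end
--                     vals[(start, end, item, 'r')] += 1
--                     start = 0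
--     # TODO: set values for loss arcs (atm Gurobi fills the gaps for us)
--     return vals
-- ===== SOURCE B (Python) =====
-- import collections
--
-- def create_variable_start(inst, is_active, patterns):
--     # Cycle-detecting walk: simulate each item run only until the start-state
--     # repeats, then add the per-cycle key counts with their multiplicity and the
--     # remainder prefix once.
--     threshold, lvec, bvec = inst
--     vals = collections.Counter()
--     for pattern in patterns:
--         start = 0
--         for item, count in pattern.items():
--             if count <= 0:
--                 continue
--             L = 2 * lvec[item]
--             seen = {}
--             trace = []
--             states = [start]
--             s = start
--             steps = 0
--             while steps < count and s not in seen: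
--                 seen[s] = steps
--                 e = s + L
--                 if e <= threshold:
--                     trace.append((s, e, item, 's'))
--                     s = 0 if e == threshold else e
--                 else:
--                     trace.append((s, 2 * threshold - e, item, 'r'))
--                     s = 0
--                 states.append(s)
--                 steps += 1
--             for key in trace:
--                 vals[key] += 1
--             if steps < count:
--                 j = seen[s]
--                 cycle = trace[j:]
--                 q, r = divmod(count - steps, len(cycle))
--                 for key in cycle:
--                     vals[key] += q
--                 for key in cycle[:r]:
--                     vals[key] += 1
--                 s = states[j + r]
--             start = s
--     return vals
-- ===== Notes on version B (the rewrite author's own statement) =====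
-- stated objective: alternative
-- what changed: Instead of iterating the reflecting walk once per unit of count, B simulates each item run only until the deterministic start-state repeats, then adds the whole repeated cycle of keys with multiplicity quotient and the remainder prefix once, reading the final state from the recorded state list.
import Mathlib
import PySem

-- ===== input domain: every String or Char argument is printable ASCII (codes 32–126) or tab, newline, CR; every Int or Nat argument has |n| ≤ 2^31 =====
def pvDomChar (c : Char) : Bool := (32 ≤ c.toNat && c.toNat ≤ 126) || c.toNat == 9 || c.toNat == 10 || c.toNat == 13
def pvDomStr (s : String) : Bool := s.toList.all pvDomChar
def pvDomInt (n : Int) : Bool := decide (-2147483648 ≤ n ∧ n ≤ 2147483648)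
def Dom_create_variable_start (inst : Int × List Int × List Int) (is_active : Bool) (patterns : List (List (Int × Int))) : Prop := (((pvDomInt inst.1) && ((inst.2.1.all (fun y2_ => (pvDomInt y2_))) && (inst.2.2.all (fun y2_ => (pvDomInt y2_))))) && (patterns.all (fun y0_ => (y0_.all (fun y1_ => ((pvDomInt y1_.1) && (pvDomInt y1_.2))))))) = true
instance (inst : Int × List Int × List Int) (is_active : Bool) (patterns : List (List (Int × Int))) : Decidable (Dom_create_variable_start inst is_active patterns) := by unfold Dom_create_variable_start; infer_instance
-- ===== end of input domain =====

-- B replaces the per-unit-of-count reflecting walk by a walk simulated only until the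
-- start-state repeats, then adds the repeated cycle of keys with its multiplicity
-- (objective: alternative algorithm; same result, different traversal).

-- ===== PORT A =====
-- one iteration of A's innermost 'for _ in range(count)' body on the state (vals, start)
def cvsStepA (T : Int) (lvec : List Int) (item : Int)
    (st : PySem.Dict (Int × Int × Int × String) Int × Int) :
    PySem.Dict (Int × Int × Int × String) Int × Int :=
  let start := st.2
  let e := start + 2 * PySem.List.pyGetD lvec item 0
  if e ≤ T then
    (st.1.modify (start, e, item, "s") 0 (· + 1), if e = T then 0 else e)
  else
    (st.1.modify (start, 2 * T - e, item, "r") 0 (· + 1), 0)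

def create_variable_start (inst : Int × List Int × List Int) (is_active : Bool)
    (patterns : List (List (Int × Int))) : List (Int × Int × Int × String × Int) :=
  let T := inst.1
  let lvec := inst.2.1
  let vals : PySem.Dict (Int × Int × Int × String) Int :=
    patterns.foldl (fun vals pattern =>
      ((PySem.Dict.ofList pattern).items.foldl (fun st ic =>
          (PySem.List.pyRange 0 ic.2 1).foldl (fun st _ => cvsStepA T lvec ic.1 st) st)
        (vals, 0)).1)
      PySem.Dict.empty
  vals.items.map (fun p => (p.1.1, p.1.2.1, p.1.2.2.1, p.1.2.2.2, p.2))

-- ===== PORT B =====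
-- the 'while steps < count and s not in seen' loop of Source B: fuel = count - steps;
-- returns (seen, trace, states, steps, s)
def cvsWalk (T L item : Int) :
    Nat → Int → PySem.Dict Int Int → List (Int × Int × Int × String) → List Int → Int →
    PySem.Dict Int Int × List (Int × Int × Int × String) × List Int × Int × Int
  | 0, s, seen, trace, states, steps => (seen, trace, states, steps, s)
  | fuel + 1, s, seen, trace, states, steps =>
    if seen.contains s then (seen, trace, states, steps, s)
    else
      let seen := seen.insert s steps
      let e := s + L
      if e ≤ T then
        cvsWalk T L item fuel (if e = T then 0 else e) seen (trace ++ [(s, e, item, "s")])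
          (states ++ [if e = T then 0 else e]) (steps + 1)
      else
        cvsWalk T L item fuel 0 seen (trace ++ [(s, 2 * T - e, item, "r")]) (states ++ [0])
          (steps + 1)

-- Source B's body of 'for item, count in pattern.items()' on the state (vals, start)
def cvsRunB (T : Int) (lvec : List Int)
    (st : PySem.Dict (Int × Int × Int × String) Int × Int) (ic : Int × Int) :
    PySem.Dict (Int × Int × Int × String) Int × Int :=
  if ic.2 ≤ 0 then st else
  let L := 2 * PySem.List.pyGetD lvec ic.1 0
  match cvsWalk T L ic.1 ic.2.toNat st.2 PySem.Dict.empty [] [st.2] 0 with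
  | (seen, trace, states, steps, s) =>
    let vals := trace.foldl (fun v k => v.modify k 0 (· + 1)) st.1
    if steps < ic.2 then
      let j := seen.getD s 0
      let cyc := trace.drop j.toNat
      let q := PySem.Int.floordiv (ic.2 - steps) cyc.length
      let r := PySem.Int.mod (ic.2 - steps) cyc.length
      let vals := cyc.foldl (fun v k => v.modify k 0 (· + q)) vals
      let vals := (cyc.take r.toNat).foldl (fun v k => v.modify k 0 (· + 1)) vals
      (vals, PySem.List.pyGetD states (j + r) 0)
    else (vals, s)

def create_variable_start_alt (inst : Int × List Int × List Int) (is_active : Bool)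
    (patterns : List (List (Int × Int))) : List (Int × Int × Int × String × Int) :=
  let T := inst.1
  let lvec := inst.2.1
  let vals : PySem.Dict (Int × Int × Int × String) Int :=
    patterns.foldl (fun vals pattern =>
      ((PySem.Dict.ofList pattern).items.foldl (fun st ic => cvsRunB T lvec st ic)
        (vals, 0)).1)
      PySem.Dict.empty
  vals.items.map (fun p => (p.1.1, p.1.2.1, p.1.2.2.1, p.1.2.2.2, p.2))

-- ===== PRECONDITION & SPEC =====
-- Pre_ excludes exactly the inputs where A raises IndexError: a pattern entry with a
-- positive count whose item is not a valid (possibly negative) index into lvec.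
def Pre_create_variable_start (inst : Int × List Int × List Int) (is_active : Bool)
    (patterns : List (List (Int × Int))) : Prop :=
  ∀ pattern ∈ patterns, ∀ p ∈ (PySem.Dict.ofList pattern).items,
    0 < p.2 → PySem.Raise.InRange inst.2.1.length p.1
instance (inst : Int × List Int × List Int) (is_active : Bool) (patterns : List (List (Int × Int))) : Decidable (Pre_create_variable_start inst is_active patterns) := by unfold Pre_create_variable_start; infer_instance
def pvWitness_create_variable_start : (Int × List Int × List Int) × Bool × (List (List (Int × Int))) :=
  ((10, [3, 2], [1, 1]), true, [[(0, 4), (1, 3)], [(1, 5)]])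

def Spec_create_variable_start (inst : Int × List Int × List Int) (is_active : Bool) (patterns : List (List (Int × Int))) (out : List (Int × Int × Int × String × Int)) : Prop := out = create_variable_start_alt inst is_active patterns
instance (inst : Int × List Int × List Int) (is_active : Bool) (patterns : List (List (Int × Int))) (out : List (Int × Int × Int × String × Int)) : Decidable (Spec_create_variable_start inst is_active patterns out) := by unfold Spec_create_variable_start; infer_instance

-- ===== CLAIM (what is proved, stated in full; the proofs are below) =====
def Claim_equal_create_variable_start : Prop := ∀ (inst : Int × List Int × List Int) (is_active : Bool) (patterns : List (List (Int × Int))), Dom_create_variable_start inst is_active patterns → Pre_create_variable_start inst is_active patterns → Spec_create_variable_start inst is_active patterns (create_variable_start inst is_active patterns)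

-- ===== LEMMAS AND PROOFS =====

-- proof-side characterisation of the walk
def cvsNext (T L s : Int) : Int :=
  let e := s + L
  if e ≤ T then (if e = T then 0 else e) else 0

def cvsKey (T L item s : Int) : Int × Int × Int × String :=
  let e := s + L
  if e ≤ T then (s, e, item, "s") else (s, 2 * T - e, item, "r")

def cvsSeq (T L s : Int) (n : Nat) : List Int :=
  (List.range n).map (fun i => (cvsNext T L)^[i] s)

def cvsSeen (T L s : Int) (n : Nat) : PySem.Dict Int Int :=
  PySem.Dict.mk ((List.range n).map (fun i => ((cvsNext T L)^[i] s, (i : Int))))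

def cvsStop (T L s0 : Int) : Nat → Nat → Nat
  | 0, t => t
  | fuel + 1, t =>
    if (cvsNext T L)^[t] s0 ∈ cvsSeq T L s0 t then t else cvsStop T L s0 fuel (t + 1)

lemma cvsSeq_succ_right (T L s : Int) (n : Nat) :
    cvsSeq T L s (n + 1) = cvsSeq T L s n ++ [(cvsNext T L)^[n] s] := by
  simp [cvsSeq, List.range_succ]

lemma cvsSeq_append (T L s : Int) (a b : Nat) :
    cvsSeq T L s (a + b) = cvsSeq T L s a ++ cvsSeq T L ((cvsNext T L)^[a] s) b := by
  simp [cvsSeq, List.range_add, List.map_map, Function.comp_def,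
    ← Function.iterate_add_apply, Nat.add_comm]

lemma cvsSeq_length (T L s : Int) (n : Nat) : (cvsSeq T L s n).length = n := by
  simp [cvsSeq]

lemma cvsSeq_take (T L s : Int) (n k : Nat) (h : k ≤ n) :
    (cvsSeq T L s n).take k = cvsSeq T L s k := by
  simp [cvsSeq, List.take_iterate, Nat.min_eq_left h]

lemma cvsStepA_eq (T : Int) (lvec : List Int) (item : Int)
    (st : PySem.Dict (Int × Int × Int × String) Int × Int) :
    cvsStepA T lvec item st
      = (st.1.modify (cvsKey T (2 * PySem.List.pyGetD lvec item 0) item st.2) 0 (· + 1),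
         cvsNext T (2 * PySem.List.pyGetD lvec item 0) st.2) := by
  simp only [cvsStepA, cvsKey, cvsNext]
  split_ifs <;> rfl

-- A's inner loop computes the counted key sequence and the iterated state
lemma cvsIterA (T : Int) (lvec : List Int) (item : Int) (l : List Int) :
    ∀ (v : PySem.Dict (Int × Int × Int × String) Int) (s : Int),
    l.foldl (fun st _ => cvsStepA T lvec item st) (v, s)
      = (((cvsSeq T (2 * PySem.List.pyGetD lvec item 0) s l.length).map
            (cvsKey T (2 * PySem.List.pyGetD lvec item 0) item)).foldl
            (fun v k => v.modify k 0 (· + 1)) v,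
         (cvsNext T (2 * PySem.List.pyGetD lvec item 0))^[l.length] s) := by
  induction l with
  | nil => intro v s; simp [cvsSeq]
  | cons x l ih =>
    intro v s
    rw [List.foldl_cons, cvsStepA_eq, ih]
    set L := 2 * PySem.List.pyGetD lvec item 0 with hL
    have hseq : cvsSeq T L s (l.length + 1) = s :: cvsSeq T L (cvsNext T L s) l.length := by
      simp [cvsSeq, List.range_succ_eq_map, List.map_map, Function.comp_def,
        Function.iterate_succ_apply]
    simp only [List.length_cons, hseq, List.map_cons, List.foldl_cons,
      Function.iterate_succ_apply]

lemma cvsSeen_contains (T L s : Int) (t : Nat) (x : Int) :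
    (cvsSeen T L s t).contains x = decide (x ∈ cvsSeq T L s t) := by
  simp [cvsSeen, cvsSeq, PySem.Dict.contains, List.any_eq]
  constructor <;> (rintro ⟨a, ha, h⟩; exact ⟨a, ha, h.symm⟩)

lemma cvsStop_le (T L s0 : Int) (fuel : Nat) :
    ∀ t : Nat, t ≤ cvsStop T L s0 fuel t ∧ cvsStop T L s0 fuel t ≤ t + fuel := by
  induction fuel with
  | zero => intro t; simp [cvsStop]
  | succ fuel ih =>
    intro t
    rw [cvsStop]
    split_ifs
    · omega
    · have := ih (t + 1); omega

lemma cvsStop_nodup (T L s0 : Int) (fuel : Nat) :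
    ∀ t : Nat, (cvsSeq T L s0 t).Nodup → (cvsSeq T L s0 (cvsStop T L s0 fuel t)).Nodup := by
  induction fuel with
  | zero => intro t h; simpa [cvsStop] using h
  | succ fuel ih =>
    intro t h
    rw [cvsStop]
    split_ifs with hm
    · exact h
    · refine ih (t + 1) ?_
      rw [cvsSeq_succ_right]
      refine List.Nodup.append h (List.nodup_singleton _) ?_
      intro a ha hb
      simp only [List.mem_singleton] at hb
      exact hm (hb ▸ ha)

lemma cvsStop_mem (T L s0 : Int) (fuel : Nat) :
    ∀ t : Nat, cvsStop T L s0 fuel t < t + fuel →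
    (cvsNext T L)^[cvsStop T L s0 fuel t] s0 ∈ cvsSeq T L s0 (cvsStop T L s0 fuel t) := by
  induction fuel with
  | zero => intro t h; rw [cvsStop] at h; omega
  | succ fuel ih =>
    intro t h
    rw [cvsStop] at h ⊢
    split_ifs at h ⊢ with hm
    · exact hm
    · exact ih (t + 1) (by omega)

-- the walk loop, characterised by the stopping index
lemma cvsWalk_spec (T L item s0 : Int) (fuel : Nat) :
    ∀ (t : Nat), (cvsSeq T L s0 t).Nodup →
    cvsWalk T L item fuel ((cvsNext T L)^[t] s0) (cvsSeen T L s0 t)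
        ((cvsSeq T L s0 t).map (cvsKey T L item)) (cvsSeq T L s0 (t + 1)) (t : Int)
      = (cvsSeen T L s0 (cvsStop T L s0 fuel t),
         (cvsSeq T L s0 (cvsStop T L s0 fuel t)).map (cvsKey T L item),
         cvsSeq T L s0 (cvsStop T L s0 fuel t + 1),
         ((cvsStop T L s0 fuel t : Nat) : Int),
         (cvsNext T L)^[cvsStop T L s0 fuel t] s0) := by
  induction fuel with
  | zero => intro t h; rw [cvsWalk, cvsStop]
  | succ fuel ih =>
    intro t h
    rw [cvsWalk, cvsStop, cvsSeen_contains]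
    by_cases hm : (cvsNext T L)^[t] s0 ∈ cvsSeq T L s0 t
    · simp [hm]
    · simp only [hm, decide_false, if_false]
      have hnd1 : (cvsSeq T L s0 (t + 1)).Nodup := by
        rw [cvsSeq_succ_right]
        refine List.Nodup.append h (List.nodup_singleton _) ?_
        intro a ha hb
        simp only [List.mem_singleton] at hb
        exact hm (hb ▸ ha)
      have hseen : (cvsSeen T L s0 t).insert ((cvsNext T L)^[t] s0) (t : Int)
          = cvsSeen T L s0 (t + 1) := by
        apply PySem.Dict.ext
        rw [PySem.Dict.items_insert_of_not_contains _ _ (by simp [cvsSeen_contains, hm])]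
        simp [cvsSeen, List.range_succ]
      have htr : ∀ br : Int × Int × Int × String, br = cvsKey T L item ((cvsNext T L)^[t] s0) →
          (cvsSeq T L s0 t).map (cvsKey T L item) ++ [br]
            = (cvsSeq T L s0 (t + 1)).map (cvsKey T L item) := by
        intro br hbr
        rw [cvsSeq_succ_right, List.map_append, hbr]
        rfl
      by_cases hle : (cvsNext T L)^[t] s0 + L ≤ T
      · rw [if_pos hle]
        have hnext : (if (cvsNext T L)^[t] s0 + L = T then 0 else (cvsNext T L)^[t] s0 + L)
            = (cvsNext T L)^[t + 1] s0 := by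
          rw [Function.iterate_succ_apply']
          simp [cvsNext, hle]
        rw [hseen, hnext,
          htr _ (by simp [cvsKey, hle]),
          show cvsSeq T L s0 (t + 1) ++ [(cvsNext T L)^[t + 1] s0] = cvsSeq T L s0 (t + 1 + 1) from
            (cvsSeq_succ_right T L s0 (t + 1)).symm,
          show ((t : Int) + 1) = ((t + 1 : Nat) : Int) by push_cast; ring]
        exact ih (t + 1) hnd1
      · rw [if_neg hle]
        have hnext : (0 : Int) = (cvsNext T L)^[t + 1] s0 := by
          rw [Function.iterate_succ_apply']
          simp [cvsNext, hle]
        rw [hseen]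
        rw [show (cvsSeq T L s0 (t + 1) ++ [(0 : Int)]) = cvsSeq T L s0 (t + 1 + 1) from by
          rw [hnext]; exact (cvsSeq_succ_right T L s0 (t + 1)).symm]
        rw [htr _ (by simp [cvsKey, hle]),
          show ((t : Int) + 1) = ((t + 1 : Nat) : Int) by push_cast; ring]
        conv_lhs => rw [hnext]
        exact ih (t + 1) hnd1

-- counter lemmas
lemma cvsAdd_keys (c : Int) (l : List (Int × Int × Int × String))
    (d : PySem.Dict (Int × Int × Int × String) Int)
    (k : Int × Int × Int × String) (h : k ∈ d.keys ∨ k ∈ l) :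
    (l.foldl (fun v k => v.modify k 0 (· + c)) d).contains k = true := by
  rw [show (fun (v : PySem.Dict (Int × Int × Int × String) Int) k => v.modify k 0 (· + c))
      = (fun v x => v.modify x 0 ((fun (_ : PySem.Dict (Int × Int × Int × String) Int)
        (_ : Int × Int × Int × String) => (· + c)) v x)) from rfl,
    PySem.Dict.contains_iff_mem_keys, PySem.Dict.keys_foldl_modify, PySem.Set.mem_update]
  exact h

lemma cvsAdd_nodup (c : Int) (l : List (Int × Int × Int × String))
    (d : PySem.Dict (Int × Int × Int × String) Int) (h : d.keys.Nodup) :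
    (l.foldl (fun v k => v.modify k 0 (· + c)) d).keys.Nodup := by
  induction l generalizing d with
  | nil => exact h
  | cons k l ih =>
    refine ih _ ?_
    rw [PySem.Dict.keys_modify]
    by_cases hc : d.contains k
    · rw [PySem.Dict.keys_insert_of_contains _ _ hc]; exact h
    · rw [PySem.Dict.keys_insert_of_not_contains _ _ (by simpa using hc)]
      refine List.Nodup.append h (List.nodup_singleton _) ?_
      intro a ha hb
      simp only [List.mem_singleton] at hb
      subst hb
      exact hc ((PySem.Dict.contains_iff_mem_keys d _).2 ha)

-- adding c at every key of l, all present, bumps the items pointwise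
lemma cvsAddC (c : Int) :
    ∀ (l : List (Int × Int × Int × String)) (d : PySem.Dict (Int × Int × Int × String) Int),
    d.keys.Nodup → (∀ k ∈ l, d.contains k = true) →
    (l.foldl (fun v k => v.modify k 0 (· + c)) d).items
      = d.items.map (fun p => (p.1, p.2 + c * (l.count p.1 : Int))) := by
  intro l
  induction l with
  | nil => intro d hnd hcon; simp
  | cons k l ih =>
    intro d hnd hcon
    have hc : d.contains k = true := hcon k (by simp)
    have hmod : d.modify k 0 (· + c) = d.insert k (d.getD k 0 + c) := rfl
    rw [List.foldl_cons, ih (d.modify k 0 (· + c))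
      (by rw [hmod, PySem.Dict.keys_insert_of_contains _ _ hc]; exact hnd)
      (by intro k2 hk2; rw [PySem.Dict.contains_modify]; simp [hcon k2 (by simp [hk2])])]
    rw [hmod, PySem.Dict.items_insert_of_contains _ _ hc, List.map_map]
    apply List.map_congr_left
    intro p hp
    have hgd : d.getD p.1 0 = p.2 := PySem.Dict.getD_of_mem_items d (by simpa using hp) hnd 0
    by_cases hpk : p.1 = k
    · subst hpk
      simp only [Function.comp_apply, BEq.rfl, if_true, hgd, List.count_cons, BEq.rfl]
      push_cast
      ring_nf
    · simp only [Function.comp_apply, beq_iff_eq, hpk, if_false, List.count_cons]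
      rw [if_neg (fun h => hpk h.symm), Nat.add_zero]

lemma cvsIter_cycle (T L x : Int) (p : Nat) (hp : (cvsNext T L)^[p] x = x) (k : Nat) :
    (cvsNext T L)^[k * p] x = x := by
  induction k with
  | zero => simp
  | succ k ih => rw [Nat.succ_mul, Function.iterate_add_apply, hp, ih]

lemma cvsSeq_cycle (T L x : Int) (p : Nat) (hp : (cvsNext T L)^[p] x = x) (q r : Nat) :
    cvsSeq T L x (q * p + r)
      = (List.replicate q (cvsSeq T L x p)).flatten ++ cvsSeq T L x r := by
  induction q with
  | zero => simp
  | succ q ih =>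
    have h1 : (q + 1) * p + r = p + (q * p + r) := by ring
    rw [h1, cvsSeq_append, hp, ih, List.replicate_succ, List.flatten_cons, List.append_assoc]

-- the central per-item-run equality
lemma cvsCount_flatten_replicate (q : Nat) (l : List (Int × Int × Int × String))
    (a : Int × Int × Int × String) :
    ((List.replicate q l).flatten).count a = q * l.count a := by
  induction q with
  | zero => simp
  | succ q ih => simp [List.replicate_succ, ih, Nat.succ_mul, Nat.add_comm]

lemma cvsRun_eq (T : Int) (lvec : List Int) (ic : Int × Int)
    (st : PySem.Dict (Int × Int × Int × String) Int × Int) (h : st.1.keys.Nodup) :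
    (PySem.List.pyRange 0 ic.2 1).foldl (fun st _ => cvsStepA T lvec ic.1 st) st
      = cvsRunB T lvec st ic := by
  obtain ⟨item, count⟩ := ic
  obtain ⟨v, s0⟩ := st
  by_cases hc : count ≤ 0
  · simp [cvsRunB, hc, PySem.List.pyRange_one_eq_nil hc]
  · -- 0 < count
    have hcpos : 0 < count := by omega
    set L := 2 * PySem.List.pyGetD lvec item 0 with hL
    set N := count.toNat with hNdef
    have hN : (N : Int) = count := Int.toNat_of_nonneg (by omega)
    -- LHS via cvsIterA
    have hlen : (PySem.List.pyRange 0 count 1).length = N := by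
      rw [PySem.List.length_pyRange_one]; simp [hNdef]
    have hA := cvsIterA T lvec item (PySem.List.pyRange 0 count 1) v s0
    rw [hlen] at hA
    rw [hA]
    -- RHS: reduce the walk
    have hw := cvsWalk_spec T L item s0 N 0 (by simp [cvsSeq])
    have h0 : ((cvsNext T L)^[0] s0) = s0 := rfl
    have h1 : cvsSeen T L s0 0 = PySem.Dict.empty := rfl
    have h2 : (cvsSeq T L s0 0).map (cvsKey T L item) = [] := rfl
    have h3 : cvsSeq T L s0 1 = [s0] := by simp [cvsSeq]
    rw [h0, h1, h2, h3] at hw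
    simp only [Nat.cast_zero] at hw
    set M := cvsStop T L s0 N 0 with hMdef
    have hMle : M ≤ N := by have := cvsStop_le T L s0 N 0; omega
    simp only [cvsRunB, if_neg hc, ← hL]
    rw [show count.toNat = N from rfl, hw]
    simp only
    by_cases hlt : (M : Int) < count
    · have hMN : M < N := by omega
      have hnodM : (cvsSeq T L s0 M).Nodup := cvsStop_nodup T L s0 N 0 (by simp [cvsSeq])
      have hmem : (cvsNext T L)^[M] s0 ∈ cvsSeq T L s0 M :=
        cvsStop_mem T L s0 N 0 (by omega)
      rw [if_pos hlt]
      obtain ⟨i, hiM, hi⟩ : ∃ i < M, (cvsNext T L)^[i] s0 = (cvsNext T L)^[M] s0 := by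
        simpa [cvsSeq, eq_comm] using hmem
      set x := (cvsNext T L)^[i] s0 with hxdef
      set p := M - i with hpdef
      have hMip : M = i + p := by omega
      have hppos : 0 < p := by omega
      have hp : (cvsNext T L)^[p] x = x := by
        rw [hxdef, ← Function.iterate_add_apply, show p + i = M by omega]
        exact hi.symm
      -- the seen lookup returns i
      have hj : (cvsSeen T L s0 M).getD ((cvsNext T L)^[M] s0) 0 = (i : Int) := by
        refine PySem.Dict.getD_of_mem_items _ ?_ ?_ 0
        · show ((cvsNext T L)^[M] s0, (i : Int)) ∈
            (List.range M).map (fun i => ((cvsNext T L)^[i] s0, (i : Int)))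
          exact List.mem_map.2 ⟨i, List.mem_range.2 hiM, congrArg (fun z => (z, (i : Int))) hi⟩
        · show (((List.range M).map (fun i => ((cvsNext T L)^[i] s0, (i : Int)))).map
            Prod.fst).Nodup
          simpa [cvsSeq, List.map_map, Function.comp_def] using hnodM
      rw [hj]
      have htoNat : ((i : Int)).toNat = i := Int.toNat_natCast i
      rw [htoNat]
      have hdrop : ((cvsSeq T L s0 M).map (cvsKey T L item)).drop i
          = (cvsSeq T L x p).map (cvsKey T L item) := by
        rw [← List.map_drop]
        congr 1
        rw [hMip, cvsSeq_append, ← hxdef]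
        exact List.drop_left' (cvsSeq_length T L s0 i)
      set cyc := (cvsSeq T L x p).map (cvsKey T L item) with hcyc
      rw [hdrop]
      have hcycLen : (cyc.length : Int) = (p : Int) := by
        simp [hcyc, cvsSeq_length]
      set dN := N - M with hdN
      have hrem : count - (M : Int) = ((dN : Nat) : Int) := by
        rw [← hN]; omega
      set qN := dN / p with hqN
      set rN := dN % p with hrN
      have hdecomp : dN = qN * p + rN := by
        rw [hqN, hrN, Nat.mul_comm]; exact (Nat.div_add_mod dN p).symm
      have hrNp : rN < p := Nat.mod_lt _ hppos
      have hq : PySem.Int.floordiv (count - (M : Int)) (cyc.length : Int) = (qN : Int) := by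
        rw [hrem, hcycLen, PySem.Int.floordiv_natCast]
      have hr : PySem.Int.mod (count - (M : Int)) (cyc.length : Int) = (rN : Int) := by
        rw [hrem, hcycLen, PySem.Int.mod_natCast]
      rw [hq, hr, Int.toNat_natCast]
      -- key sequence decomposition
      have hxM : (cvsNext T L)^[M] s0 = x := hi.symm ▸ rfl
      have hseqN : cvsSeq T L s0 N
          = cvsSeq T L s0 M ++ ((List.replicate qN (cvsSeq T L x p)).flatten ++ cvsSeq T L x rN) := by
        rw [show N = M + dN by omega, cvsSeq_append, ← hxM.symm]
        rw [hdecomp, cvsSeq_cycle T L x p hp qN rN]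
      have htail : cyc.take rN = (cvsSeq T L x rN).map (cvsKey T L item) := by
        rw [hcyc, ← List.map_take, cvsSeq_take T L x p rN (by omega)]
      -- the shared first phase
      set D0 := ((cvsSeq T L s0 M).map (cvsKey T L item)).foldl
        (fun v k => v.modify k 0 (· + 1)) v with hD0
      have hD0nd : D0.keys.Nodup := cvsAdd_nodup 1 _ v h
      have hcyccon : ∀ k ∈ cyc, D0.contains k = true := by
        intro k hk
        refine cvsAdd_keys 1 _ v k (Or.inr ?_)
        have : k ∈ ((cvsSeq T L s0 M).map (cvsKey T L item)).drop i := hdrop ▸ hk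
        exact List.mem_of_mem_drop this
      -- value components agree
      have hvals :
          (((List.replicate qN (cvsSeq T L x p)).flatten ++ cvsSeq T L x rN).map
              (cvsKey T L item)).foldl (fun v k => v.modify k 0 (· + 1)) D0
          = (cyc.take rN).foldl (fun v k => v.modify k 0 (· + 1))
              (cyc.foldl (fun v k => v.modify k 0 (· + (qN : Int))) D0) := by
        rw [List.map_append, List.foldl_append, htail]
        have hflat : ((List.replicate qN (cvsSeq T L x p)).flatten).map (cvsKey T L item)
            = (List.replicate qN cyc).flatten := by
          rw [List.map_flatten, List.map_replicate, hcyc]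
        rw [hflat]
        congr 1
        apply PySem.Dict.ext
        rw [cvsAddC 1 _ D0 hD0nd (by
          intro k hk
          exact hcyccon k (by
            rcases List.mem_flatten.1 hk with ⟨l', hl', hkl⟩
            rw [List.eq_of_mem_replicate hl'] at hkl
            exact hkl))]
        rw [cvsAddC (qN : Int) _ D0 hD0nd hcyccon]
        apply List.map_congr_left
        intro pq hpq
        have : (((List.replicate qN cyc).flatten).count pq.1 : Int)
            = (qN : Int) * (cyc.count pq.1 : Int) := by
          rw [cvsCount_flatten_replicate]; push_cast; ring
        rw [this]
        simp
      refine Prod.ext_iff.mpr ⟨?_, ?_⟩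
      · rw [hseqN, List.map_append, List.foldl_append, ← hD0, hvals, htail]
      · -- state components agree
        have hcast : (i : Int) + (rN : Int) = ((i + rN : Nat) : Int) := by push_cast; ring
        rw [hcast, PySem.List.pyGetD_natCast]
        have hlt2 : i + rN < (cvsSeq T L s0 (M + 1)).length := by
          rw [cvsSeq_length]; omega
        rw [List.getD_eq_getElem _ _ hlt2]
        have hidx : (cvsSeq T L s0 (M + 1))[i + rN] = (cvsNext T L)^[i + rN] s0 := by
          simp only [cvsSeq, List.getElem_map, List.getElem_range]
        rw [hidx]
        have : (cvsNext T L)^[N] s0 = (cvsNext T L)^[i + rN] s0 := by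
          rw [show N = rN + ((qN + 1) * p + i) by
              have hmul : (qN + 1) * p = qN * p + p := by ring
              omega,
            Function.iterate_add_apply, Function.iterate_add_apply,
            show (cvsNext T L)^[i] s0 = x from rfl,
            cvsIter_cycle T L x p hp (qN + 1),
            show i + rN = rN + i by omega, Function.iterate_add_apply]
        rw [this]
    · rw [if_neg hlt]
      have hMN : M = N := by omega
      rw [hMN]

lemma cvsFoldl_congr_inv {α β : Type} (P : β → Prop) (f g : β → α → β) (l : List α)
    (hP : ∀ a x, P a → P (f a x)) (hfg : ∀ a x, P a → f a x = g a x) :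
    ∀ (a0 : β), P a0 → l.foldl f a0 = l.foldl g a0 ∧ P (l.foldl f a0) := by
  induction l with
  | nil => intro a0 h0; exact ⟨rfl, h0⟩
  | cons x l ih =>
    intro a0 h0
    have h1 := hP a0 x h0
    have := ih (f a0 x) h1
    simp only [List.foldl_cons]
    exact ⟨this.1.trans (by rw [hfg a0 x h0]), this.2⟩

lemma cvsRunA_nodup (T : Int) (lvec : List Int)
    (st : PySem.Dict (Int × Int × Int × String) Int × Int) (ic : Int × Int)
    (h : st.1.keys.Nodup) :
    (((PySem.List.pyRange 0 ic.2 1).foldl (fun st _ => cvsStepA T lvec ic.1 st) st).1).keys.Nodup := by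
  obtain ⟨v, s⟩ := st
  rw [cvsIterA]
  exact cvsAdd_nodup 1 _ v h

-- ===== VERDICT (by name: the statement is the Claim_ definition above) =====
lemma cvsPat_eq (T : Int) (lvec : List Int) (pattern : List (Int × Int))
    (vals : PySem.Dict (Int × Int × Int × String) Int) (hnd : vals.keys.Nodup) :
    (PySem.Dict.ofList pattern).items.foldl (fun st ic =>
        (PySem.List.pyRange 0 ic.2 1).foldl (fun st _ => cvsStepA T lvec ic.1 st) st)
      (vals, 0)
    = (PySem.Dict.ofList pattern).items.foldl (fun st ic => cvsRunB T lvec st ic) (vals, 0) := by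
  exact (cvsFoldl_congr_inv (fun st => st.1.keys.Nodup) _ _
    (PySem.Dict.ofList pattern).items
    (fun a x ha => cvsRunA_nodup T lvec a x ha)
    (fun a x ha => cvsRun_eq T lvec x a ha) (vals, 0) hnd).1

lemma cvsPat_nodup (T : Int) (lvec : List Int) (pattern : List (Int × Int))
    (vals : PySem.Dict (Int × Int × Int × String) Int) (hnd : vals.keys.Nodup) :
    (((PySem.Dict.ofList pattern).items.foldl (fun st ic =>
        (PySem.List.pyRange 0 ic.2 1).foldl (fun st _ => cvsStepA T lvec ic.1 st) st)
      (vals, 0)).1).keys.Nodup := by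
  exact (cvsFoldl_congr_inv (fun st => st.1.keys.Nodup) _ _
    (PySem.Dict.ofList pattern).items
    (fun a x ha => cvsRunA_nodup T lvec a x ha)
    (fun _ _ _ => rfl) (vals, 0) hnd).2

lemma cvsVals_eq (T : Int) (lvec : List Int) (patterns : List (List (Int × Int))) :
      patterns.foldl (fun vals pattern =>
        ((PySem.Dict.ofList pattern).items.foldl (fun st ic =>
            (PySem.List.pyRange 0 ic.2 1).foldl (fun st _ => cvsStepA T lvec ic.1 st) st)
          (vals, 0)).1) PySem.Dict.empty
      = patterns.foldl (fun vals pattern =>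
        ((PySem.Dict.ofList pattern).items.foldl (fun st ic => cvsRunB T lvec st ic)
          (vals, 0)).1) PySem.Dict.empty := by
  exact (cvsFoldl_congr_inv (fun d => d.keys.Nodup) _ _ patterns
    (fun vals pattern hnd => cvsPat_nodup T lvec pattern vals hnd)
    (fun vals pattern hnd => by
      exact congrArg Prod.fst (cvsPat_eq T lvec pattern vals hnd))
    PySem.Dict.empty PySem.Dict.nodup_keys_empty).1

theorem create_variable_start_spec : Claim_equal_create_variable_start := by
  intro inst is_active patterns _ _
  unfold Spec_create_variable_start create_variable_start create_variable_start_alt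
  dsimp only
  rw [cvsVals_eq]
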